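-- pv_equiv track=rewrite | github.com/ctc316/algorithm-python | Lintcode/Ladder_48_Backpack/2_Multiple_Choice Backpack/799. Backpack VIII.py | backPackVIII
-- ===== SOURCE A (Python) =====
-- def backPackVIII(n, value, amount):
--     '''
--         5
--         [1,2,4]
--         [2,1,1]
--
--         [1,0,0,0,0,0]
--     1,2 [1,1,1,0,0,0]
--     2,1 [1,1,1,1,1,0]
--     4,1 [1,1,1,1,1,1]
--
--     '''
--     dp = [False for _ in range(n + 1)]
--     dp[0] = True
--     count = 0
--     for i in range(len(value)):
--         used = [0 for _ in range(n + 1)]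
--         for j in range(value[i], n + 1):
--             if not dp[j] and dp[j - value[i]] and used[j - value[i]] < amount[i]:
--                 dp[j] = 1
--                 count += 1
--                 used[j] = used[j - value[i]] + 1
--
--     return count
-- ===== SOURCE B (Python) =====
-- def backPackVIII(n, value, amount):
--     dp = [j == 0 for j in range(n + 1)]
--     for v, a in zip(value, amount):
--         if v <= 0 or a <= 0:
--             continue
--         dp = [any(dp[j - k * v] for k in range(min(a, j // v) + 1))
--               for j in range(n + 1)]
--     return sum(dp[1:])
-- ===== Notes on version B (the rewrite author's own statement) =====
-- stated objective: alternative
-- what changed: Replaces A's in-place forward pass with the used-copies amortization array and a running counter by a per-item functional rebuild of the reachability table via a direct bounded scan over copy counts, with the answer read off the final table.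
-- outside the precondition, e.g. on backPackVIII(1, [-1], [1]): A returns 1, B returns 0; on backPackVIII(0, [1], []): A returns 0, B returns 0
import Mathlib
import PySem

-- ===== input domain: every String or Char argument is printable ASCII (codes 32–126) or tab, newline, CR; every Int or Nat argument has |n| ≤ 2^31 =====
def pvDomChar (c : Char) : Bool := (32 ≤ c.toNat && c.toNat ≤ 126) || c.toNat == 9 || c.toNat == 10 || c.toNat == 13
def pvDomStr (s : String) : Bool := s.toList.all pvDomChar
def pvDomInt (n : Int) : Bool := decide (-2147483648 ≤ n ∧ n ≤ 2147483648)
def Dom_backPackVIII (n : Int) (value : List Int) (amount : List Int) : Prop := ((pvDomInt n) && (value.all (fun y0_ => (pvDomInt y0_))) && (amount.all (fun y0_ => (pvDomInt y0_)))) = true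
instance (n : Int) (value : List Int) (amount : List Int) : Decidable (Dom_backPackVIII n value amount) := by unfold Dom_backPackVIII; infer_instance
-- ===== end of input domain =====

-- B rebuilds the per-item reachability table functionally with a bounded scan over copy
-- counts instead of A's in-place used-array pass with a running counter (objective: alternative).


-- ===== PORT A =====
-- body of 'for j in range(value[i], n + 1): …' (state: dp, used, count)
def pvBodyA (v a : Int) (s : List Bool × List Int × Int) (j : Int) : List Bool × List Int × Int :=
  if ¬ (PySem.List.pyGetD s.1 j false = true)
     ∧ (PySem.List.pyGetD s.1 (j - v) false = true)
     ∧ (PySem.List.pyGetD s.2.1 (j - v) 0 < a) then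
    (PySem.List.pySetD s.1 j true,
     PySem.List.pySetD s.2.1 j (PySem.List.pyGetD s.2.1 (j - v) 0 + 1),
     s.2.2 + 1)
  else s

-- one iteration of 'for i in range(len(value))' given v = value[i], a = amount[i]
def pvItemACore (n : Int) (st : List Bool × Int) (v a : Int) : List Bool × Int :=
  let used0 : List Int := (PySem.List.pyRange 0 (n + 1) 1).map (fun _ => 0)
  let r := (PySem.List.pyRange v (n + 1) 1).foldl (pvBodyA v a) (st.1, used0, st.2)
  (r.1, r.2.2)

def pvItemA (n : Int) (value amount : List Int) (st : List Bool × Int) (i : Int) : List Bool × Int :=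
  pvItemACore n st (PySem.List.pyGetD value i 0) (PySem.List.pyGetD amount i 0)
  -- pyGetD on amount: Python raises IndexError when len(amount) ≤ i; excluded by Pre_

def backPackVIII (n : Int) (value : List Int) (amount : List Int) : Int :=
  -- dp = [False for _ in range(n + 1)]; dp[0] = True (IndexError when n < 0: excluded by Pre_);
  -- count = 0; for i in range(len(value)): … ; return count
  ((PySem.List.pyRange 0 (value.length : Int) 1).foldl (pvItemA n value amount)
    (PySem.List.pySetD ((PySem.List.pyRange 0 (n + 1) 1).map (fun _ => false)) 0 true, 0)).2

-- ===== PORT B =====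
-- dp = [any(dp[j - k*v] for k in range(min(a, j // v) + 1)) for j in range(n + 1)]
def pvStepB (n : Int) (dp : List Bool) (va : Int × Int) : List Bool :=
  if va.1 ≤ 0 ∨ va.2 ≤ 0 then dp
  else (PySem.List.pyRange 0 (n + 1) 1).map (fun j =>
    (PySem.List.pyRange 0 (min va.2 (PySem.Int.floordiv j va.1) + 1) 1).any
      (fun k => PySem.List.pyGetD dp (j - k * va.1) false))

def backPackVIII_alt (n : Int) (value : List Int) (amount : List Int) : Int :=
  -- dp = [j == 0 for j in range(n + 1)]; for v, a in zip(value, amount): …; return sum(dp[1:])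
  ((PySem.List.slice
      ((value.zip amount).foldl (pvStepB n) ((PySem.List.pyRange 0 (n + 1) 1).map (fun j => j == 0)))
      (some 1) none).map (fun b => if b then (1 : Int) else 0)).sum

-- ===== PRECONDITION & SPEC =====
-- Pre_ excludes: n < 0 and value longer than amount (A raises IndexError there, except when the
-- missing amount cell is never consulted), and negative item values, on which A either raises
-- IndexError or returns counts produced by Python's accidental negative-index wraparound.
def Pre_backPackVIII (n : Int) (value : List Int) (amount : List Int) : Prop :=
  0 ≤ n ∧ value.length ≤ amount.length ∧ ∀ v ∈ value, 0 ≤ v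
instance (n : Int) (value : List Int) (amount : List Int) : Decidable (Pre_backPackVIII n value amount) := by
  unfold Pre_backPackVIII; infer_instance

def pvWitness_backPackVIII : Int × List Int × List Int := (5, [1, 2, 4], [2, 1, 1])

def Spec_backPackVIII (n : Int) (value : List Int) (amount : List Int) (out : Int) : Prop := out = backPackVIII_alt n value amount
instance (n : Int) (value : List Int) (amount : List Int) (out : Int) : Decidable (Spec_backPackVIII n value amount out) := by unfold Spec_backPackVIII; infer_instance

-- ===== CLAIM (what is proved, stated in full; the proofs are below) =====
def Claim_equal_backPackVIII : Prop := ∀ (n : Int) (value : List Int) (amount : List Int), Dom_backPackVIII n value amount → Pre_backPackVIII n value amount → Spec_backPackVIII n value amount (backPackVIII n value amount)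

-- ===== LEMMAS AND PROOFS =====

-- k copies of an item of size vn fit at j over base table f, k within the bound a
abbrev pvP (f : Nat → Bool) (vn : Nat) (a : Int) (j k : Nat) : Prop :=
  k ≤ j ∧ (k : Int) ≤ a ∧ k * vn ≤ j ∧ f (j - k * vn) = true

def pvReach (f : Nat → Bool) (vn : Nat) (a : Int) (j : Nat) : Bool :=
  (List.range (j + 1)).any (fun k => decide (pvP f vn a j k))

lemma pvReach_iff (f : Nat → Bool) (vn : Nat) (a : Int) (j : Nat) :
    pvReach f vn a j = true ↔ ∃ k, pvP f vn a j k := by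
  simp [pvReach, List.any_eq_true]

-- least number of copies used (0 when unreachable)
def pvMin (f : Nat → Bool) (vn : Nat) (a : Int) (j : Nat) : Nat :=
  if h : pvReach f vn a j = true then Nat.find ((pvReach_iff f vn a j).mp h) else 0

-- the per-item table transformation both programs implement
def pvStep (v a : Int) (f : Nat → Bool) : Nat → Bool :=
  fun j => if v ≤ 0 ∨ a ≤ 0 then f j else pvReach f v.toNat a j

def pvDP (pairs : List (Int × Int)) : Nat → Bool :=
  pairs.foldl (fun f va => pvStep va.1 va.2 f) (fun j => decide (j = 0))

lemma pvReach_congr (f g : Nat → Bool) (vn : Nat) (a : Int) (j : Nat)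
    (h : ∀ i ≤ j, f i = g i) : pvReach f vn a j = pvReach g vn a j := by
  rw [Bool.eq_iff_iff, pvReach_iff, pvReach_iff]
  constructor
  · rintro ⟨k, h1, h2, h3, h4⟩
    exact ⟨k, h1, h2, h3, by rw [← h _ (Nat.sub_le j _)]; exact h4⟩
  · rintro ⟨k, h1, h2, h3, h4⟩
    exact ⟨k, h1, h2, h3, by rw [h _ (Nat.sub_le j _)]; exact h4⟩

lemma pvReach_of_f (f : Nat → Bool) (vn : Nat) (a : Int) (j : Nat)
    (ha : 0 < a) (hf : f j = true) : pvReach f vn a j = true := by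
  rw [pvReach_iff]
  exact ⟨0, Nat.zero_le _, by exact_mod_cast ha.le, by simp, by simpa using hf⟩

lemma pvMin_of_f (f : Nat → Bool) (vn : Nat) (a : Int) (j : Nat)
    (hf : f j = true) : pvMin f vn a j = 0 := by
  unfold pvMin
  split
  · next hr =>
    rw [Nat.find_eq_zero]
    obtain ⟨k, _, hk2, _, _⟩ := (pvReach_iff f vn a j).mp hr
    exact ⟨Nat.zero_le _, by omega, by simp, by simpa using hf⟩
  · rfl

lemma pvReach_low (f : Nat → Bool) (vn : Nat) (a : Int) (j : Nat)
    (hv : 0 < vn) (ha : 0 < a) (hj : j < vn) : pvReach f vn a j = f j := by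
  cases hf : f j with
  | true => exact pvReach_of_f f vn a j ha hf
  | false =>
    by_contra hne
    have hr : pvReach f vn a j = true := by
      cases hx : pvReach f vn a j <;> simp_all
    obtain ⟨k, h1, h2, h3, h4⟩ := (pvReach_iff f vn a j).mp hr
    have hk0 : k = 0 := by nlinarith [Nat.le_mul_of_pos_right k hv]
    subst hk0; simp at h3 h4; simp [h4] at hf

lemma pvMin_low (f : Nat → Bool) (vn : Nat) (a : Int) (j : Nat)
    (hv : 0 < vn) (hj : j < vn) : pvMin f vn a j = 0 := by
  unfold pvMin
  split
  · next hr =>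
    obtain ⟨k, h1, h2, h3, h4⟩ := (pvReach_iff f vn a j).mp hr
    have hk0 : k = 0 := by nlinarith [Nat.le_mul_of_pos_right k hv]
    subst hk0
    rw [Nat.find_eq_zero]
    exact ⟨h1, h2, h3, h4⟩
  · rfl

lemma pvP_succ (f : Nat → Bool) (vn : Nat) (a : Int) (t k : Nat) (hv : 0 < vn)
    (h : pvP f vn a (vn + t) (k + 1)) : pvP f vn a t k := by
  obtain ⟨h1, h2, h3, h4⟩ := h
  have hm : (k + 1) * vn = k * vn + vn := by ring
  have hkm : k ≤ k * vn := Nat.le_mul_of_pos_right k hv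
  refine ⟨by omega, by exact_mod_cast le_trans (by push_cast; omega) h2, by omega, ?_⟩
  have : vn + t - (k + 1) * vn = t - k * vn := by omega
  rw [this] at h4
  exact h4

lemma pvReach_succ (f : Nat → Bool) (vn : Nat) (a : Int) (t : Nat)
    (hv : 0 < vn) (hf : f (vn + t) = false) :
    pvReach f vn a (vn + t) = true ↔
      (pvReach f vn a t = true ∧ (pvMin f vn a t : Int) < a) := by
  constructor
  · intro hr
    obtain ⟨k, h1, h2, h3, h4⟩ := (pvReach_iff f vn a (vn + t)).mp hr
    cases k with
    | zero => simp [hf] at h4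
    | succ k' =>
      have hp : pvP f vn a t k' := pvP_succ f vn a t k' hv ⟨h1, h2, h3, h4⟩
      have hrt : pvReach f vn a t = true := (pvReach_iff f vn a t).mpr ⟨k', hp⟩
      refine ⟨hrt, ?_⟩
      unfold pvMin
      rw [dif_pos hrt]
      have hle : Nat.find ((pvReach_iff f vn a t).mp hrt) ≤ k' := Nat.find_le hp
      push_cast at h2 ⊢
      omega
  · rintro ⟨hrt, hm⟩
    unfold pvMin at hm
    rw [dif_pos hrt] at hm
    set m := Nat.find ((pvReach_iff f vn a t).mp hrt) with hmdef
    have hp : pvP f vn a t m := Nat.find_spec ((pvReach_iff f vn a t).mp hrt)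
    obtain ⟨h1, h2, h3, h4⟩ := hp
    rw [pvReach_iff]
    refine ⟨m + 1, by omega, by push_cast; omega, ?_, ?_⟩
    · have : (m + 1) * vn = m * vn + vn := by ring
      omega
    · have : vn + t - (m + 1) * vn = t - m * vn := by
        have : (m + 1) * vn = m * vn + vn := by ring
        omega
      rw [this]
      exact h4

lemma pvMin_succ (f : Nat → Bool) (vn : Nat) (a : Int) (t : Nat)
    (hv : 0 < vn) (hf : f (vn + t) = false)
    (hr : pvReach f vn a t = true) (hm : (pvMin f vn a t : Int) < a) :
    pvMin f vn a (vn + t) = pvMin f vn a t + 1 := by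
  have hrj : pvReach f vn a (vn + t) = true :=
    (pvReach_succ f vn a t hv hf).mpr ⟨hr, hm⟩
  unfold pvMin
  rw [dif_pos hrj, dif_pos hr]
  unfold pvMin at hm
  rw [dif_pos hr] at hm
  set m := Nat.find ((pvReach_iff f vn a t).mp hr) with hmdef
  have hp : pvP f vn a t m := Nat.find_spec ((pvReach_iff f vn a t).mp hr)
  obtain ⟨h1, h2, h3, h4⟩ := hp
  rw [Nat.find_eq_iff]
  constructor
  · refine ⟨by omega, by push_cast; omega, ?_, ?_⟩
    · have : (m + 1) * vn = m * vn + vn := by ring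
      omega
    · have heq : vn + t - (m + 1) * vn = t - m * vn := by
        have : (m + 1) * vn = m * vn + vn := by ring
        omega
      rw [heq]
      exact h4
  · intro k hk
    cases k with
    | zero => simp [pvP, hf]
    | succ k' =>
      intro hpk
      have hp' : pvP f vn a t k' := pvP_succ f vn a t k' hv hpk
      exact Nat.find_min ((pvReach_iff f vn a t).mp hr) (by omega) hp'

lemma pvCountP_split {α : Type} (l : List α) (p q : α → Bool)
    (h : ∀ x ∈ l, p x = true → q x = true) :
    l.countP q = l.countP p + l.countP (fun x => q x && !p x) := by
  induction l with
  | nil => simp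
  | cons x xs ih =>
    have hx := h x (by simp)
    have ihx := ih (fun y hy => h y (by simp [hy]))
    cases hp : p x <;> cases hq : q x <;>
      simp_all <;> omega

lemma pvFoldl_fixed {α β : Type} (l : List β) (body : α → β → α) (s : α)
    (h : ∀ x ∈ l, body s x = s) : l.foldl body s = s := by
  induction l with
  | nil => rfl
  | cons x xs ih =>
    rw [List.foldl_cons, h x (by simp)]
    exact ih (fun y hy => h y (by simp [hy]))

lemma pvGetD_const0 (m i : Int) :
    PySem.List.pyGetD ((PySem.List.pyRange 0 m 1).map (fun _ => (0 : Int))) i 0 = 0 := by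
  unfold PySem.List.pyGetD
  cases hx : PySem.List.pyGet? ((PySem.List.pyRange 0 m 1).map (fun _ => (0 : Int))) i with
  | none => rfl
  | some x =>
    have := PySem.List.mem_of_pyGet?_eq_some _ hx
    simp at this
    simp [this]

lemma pvGetD_int {α : Type} (xs : List α) (i : Int) (d : α) (h0 : 0 ≤ i) :
    PySem.List.pyGetD xs i d = xs.getD i.toNat d := by
  have h := PySem.List.pyGetD_natCast (n := i.toNat) (xs := xs) (d := d)
  rw [show ((i.toNat : Nat) : Int) = i from by omega] at h
  exact h

lemma pvSetD_int {α : Type} (xs : List α) (i : Int) (x : α) (h0 : 0 ≤ i) :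
    PySem.List.pySetD xs i x = xs.set i.toNat x := by
  have h := PySem.List.pySetD_natCast (n := i.toNat) (xs := xs) (v := x)
  rw [show ((i.toNat : Nat) : Int) = i from by omega] at h
  exact h

lemma pvUsed0_getD (m : Int) (jn : Nat) :
    ((PySem.List.pyRange 0 m 1).map (fun _ => (0 : Int))).getD jn 0 = 0 := by
  rw [List.getD_eq_getElem?_getD, List.getElem?_map]
  cases (PySem.List.pyRange 0 m 1)[jn]? <;> rfl

lemma pvUsed0_len (n : Int) (hn : 0 ≤ n) :
    ((PySem.List.pyRange 0 (n + 1) 1).map (fun _ => (0 : Int))).length = (n + 1).toNat := by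
  simp [PySem.List.length_pyRange_one]

lemma pvGetD_set_self {α : Type} (xs : List α) (i : Nat) (x d : α) (h : i < xs.length) :
    (xs.set i x).getD i d = x := by
  simp [List.getD_eq_getElem?_getD, h]

lemma pvGetD_set_ne {α : Type} (xs : List α) (i j : Nat) (x d : α) (hne : i ≠ j) :
    (xs.set i x).getD j d = xs.getD j d := by
  simp [List.getD_eq_getElem?_getD, List.getElem?_set_ne hne]

-- the inner loop of A, processed up to j < v + t
lemma pvInnerA_aux (n v a : Int) (hn : 0 ≤ n) (hv : 0 < v) (ha : 0 < a)
    (dp0 : List Bool) (c : Int) (hdl : dp0.length = (n + 1).toNat)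
    (t : Nat) (ht : v + t ≤ n + 1) :
    (((PySem.List.pyRange v (v + (t : Int)) 1).foldl (pvBodyA v a)
        (dp0, (PySem.List.pyRange 0 (n + 1) 1).map (fun _ => (0 : Int)), c)).1.length = (n + 1).toNat) ∧
    (((PySem.List.pyRange v (v + (t : Int)) 1).foldl (pvBodyA v a)
        (dp0, (PySem.List.pyRange 0 (n + 1) 1).map (fun _ => (0 : Int)), c)).2.1.length = (n + 1).toNat) ∧
    (∀ jn < (n + 1).toNat,
      ((PySem.List.pyRange v (v + (t : Int)) 1).foldl (pvBodyA v a)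
        (dp0, (PySem.List.pyRange 0 (n + 1) 1).map (fun _ => (0 : Int)), c)).1.getD jn false =
      if (jn : Int) < v + t then pvReach (fun i => dp0.getD i false) v.toNat a jn
      else dp0.getD jn false) ∧
    (∀ jn < (n + 1).toNat,
      ((PySem.List.pyRange v (v + (t : Int)) 1).foldl (pvBodyA v a)
        (dp0, (PySem.List.pyRange 0 (n + 1) 1).map (fun _ => (0 : Int)), c)).2.1.getD jn 0 =
      if (jn : Int) < v + t then (pvMin (fun i => dp0.getD i false) v.toNat a jn : Int) else 0) ∧
    (((PySem.List.pyRange v (v + (t : Int)) 1).foldl (pvBodyA v a)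
        (dp0, (PySem.List.pyRange 0 (n + 1) 1).map (fun _ => (0 : Int)), c)).2.2 =
      c + ((List.range (v + (t : Int)).toNat).countP
            (fun jn => pvReach (fun i => dp0.getD i false) v.toNat a jn
                        && ! dp0.getD jn false) : Int)) := by
  induction t with
  | zero =>
    rw [show ((0 : Nat) : Int) = 0 from rfl, add_zero,
        PySem.List.pyRange_one_eq_nil (le_refl v), List.foldl_nil]
    have hv' : 0 < v.toNat := by omega
    refine ⟨hdl, pvUsed0_len n hn, ?_, ?_, ?_⟩
    · intro jn hjn
      split
      · next hlt =>
        rw [pvReach_low _ _ _ _ hv' ha (by omega)]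
      · rfl
    · intro jn hjn
      rw [pvUsed0_getD]
      split
      · next hlt =>
        rw [pvMin_low _ _ _ _ hv' (by omega)]
        rfl
      · rfl
    · rw [List.countP_eq_zero.mpr, Nat.cast_zero, add_zero]
      intro jn hjn
      rw [List.mem_range] at hjn
      rw [pvReach_low _ _ _ _ hv' ha (by omega)]
      cases (dp0.getD jn false) <;> simp
  | succ t ih =>
    have ht' : v + (t : Int) ≤ n + 1 := by push_cast at ht ⊢; omega
    obtain ⟨ih1, ih2, ih3, ih4, ih5⟩ := ih ht'
    have hcast : ((t + 1 : Nat) : Int) = (t : Int) + 1 := by push_cast; ring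
    have hsplit : PySem.List.pyRange v (v + ((t + 1 : Nat) : Int)) 1 =
        PySem.List.pyRange v (v + (t : Int)) 1 ++ [v + (t : Int)] := by
      rw [hcast, ← add_assoc]
      exact PySem.List.pyRange_one_succ_right (by omega)
    rw [hsplit, List.foldl_append, List.foldl_cons, List.foldl_nil]
    set r := (PySem.List.pyRange v (v + (t : Int)) 1).foldl (pvBodyA v a)
      (dp0, (PySem.List.pyRange 0 (n + 1) 1).map (fun _ => (0 : Int)), c) with hrdef
    set f := fun i : Nat => dp0.getD i false with hfdef
    set vn := v.toNat with hvndef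
    have hv' : 0 < vn := by omega
    set jn0 := (v + (t : Int)).toNat with hjn0def
    have hj0 : (jn0 : Int) = v + (t : Int) := by omega
    have hj0N : jn0 < (n + 1).toNat := by push_cast at ht; omega
    have hj0vt : jn0 = vn + t := by omega
    have htN : t < (n + 1).toNat := by push_cast at ht; omega
    have e1 : PySem.List.pyGetD r.1 (v + (t : Int)) false = f jn0 := by
      rw [pvGetD_int _ _ _ (by omega), ← hjn0def, ih3 jn0 hj0N, if_neg (by omega)]
    have esub : v + (t : Int) - v = (t : Int) := by ring
    have e2 : PySem.List.pyGetD r.1 (v + (t : Int) - v) false = pvReach f vn a t := by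
      rw [esub, pvGetD_int _ _ _ (by omega), Int.toNat_natCast, ih3 t htN, if_pos (by omega)]
    have e3 : PySem.List.pyGetD r.2.1 (v + (t : Int) - v) 0 = (pvMin f vn a t : Int) := by
      rw [esub, pvGetD_int _ _ _ (by omega), Int.toNat_natCast, ih4 t htN, if_pos (by omega)]
    have hsz : (v + ((t + 1 : Nat) : Int)).toNat = (v + (t : Int)).toNat + 1 := by
      push_cast; omega
    by_cases hfj : f jn0 = true
    · -- dp[j] already true: no change
      have hcond : ¬ (¬ (PySem.List.pyGetD r.1 (v + (t : Int)) false = true)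
          ∧ (PySem.List.pyGetD r.1 (v + (t : Int) - v) false = true)
          ∧ (PySem.List.pyGetD r.2.1 (v + (t : Int) - v) 0 < a)) := by
        rw [e1, hfj]; simp
      rw [pvBodyA, if_neg hcond]
      refine ⟨ih1, ih2, ?_, ?_, ?_⟩
      · intro jn hjn
        rw [ih3 jn hjn]
        by_cases hjej : jn = jn0
        · subst hjej
          rw [if_neg (by omega), if_pos (by rw [hcast]; omega),
              pvReach_of_f f vn a jn0 ha hfj]
          exact hfj
        · split
          · next h1 => rw [if_pos (by rw [hcast]; omega)]
          · next h1 => rw [if_neg (by rw [hcast] at *; omega)]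
      · intro jn hjn
        rw [ih4 jn hjn]
        by_cases hjej : jn = jn0
        · subst hjej
          rw [if_neg (by omega), if_pos (by rw [hcast]; omega), pvMin_of_f f vn a jn0 hfj]
          simp
        · split
          · next h1 => rw [if_pos (by rw [hcast] at *; omega)]
          · next h1 => rw [if_neg (by rw [hcast] at *; omega)]
      · rw [ih5, hsz, List.range_succ, List.countP_append]
        have : (List.countP (fun jn => pvReach f vn a jn && !f jn) [(v + (t : Int)).toNat]) = 0 := by
          simp [List.countP_cons, ← hjn0def, hfj]
        rw [this, Nat.add_zero]
    · have hfj' : f jn0 = false := by cases h : f jn0 <;> simp_all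
      by_cases hgo : pvReach f vn a t = true ∧ (pvMin f vn a t : Int) < a
      · -- the cell becomes reachable now
        have hft : f (vn + t) = false := by rw [← hj0vt]; exact hfj'
        have hreach : pvReach f vn a jn0 = true := by
          rw [hj0vt]
          exact (pvReach_succ f vn a t hv' hft).mpr hgo
        have hmin : pvMin f vn a jn0 = pvMin f vn a t + 1 := by
          rw [hj0vt]
          exact pvMin_succ f vn a t hv' hft hgo.1 hgo.2
        have hcond : (¬ (PySem.List.pyGetD r.1 (v + (t : Int)) false = true)
            ∧ (PySem.List.pyGetD r.1 (v + (t : Int) - v) false = true)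
            ∧ (PySem.List.pyGetD r.2.1 (v + (t : Int) - v) 0 < a)) := by
          rw [e1, e2, e3, hfj']
          exact ⟨by simp, hgo.1, hgo.2⟩
        rw [pvBodyA, if_pos hcond]
        have hsets : PySem.List.pySetD r.1 (v + (t : Int)) true = r.1.set jn0 true := by
          rw [pvSetD_int _ _ _ (by omega), ← hjn0def]
        have hsetu : PySem.List.pySetD r.2.1 (v + (t : Int))
            (PySem.List.pyGetD r.2.1 (v + (t : Int) - v) 0 + 1) =
            r.2.1.set jn0 ((pvMin f vn a t : Int) + 1) := by
          rw [e3, pvSetD_int _ _ _ (by omega), ← hjn0def]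
        refine ⟨?_, ?_, ?_, ?_, ?_⟩
        · simp only [hsets, List.length_set]; exact ih1
        · simp only [hsetu, List.length_set]; exact ih2
        · intro jn hjn
          simp only [hsets]
          by_cases hjej : jn = jn0
          · subst hjej
            rw [pvGetD_set_self _ _ _ _ (by rw [ih1]; exact hj0N),
                if_pos (by rw [hcast]; omega), hreach]
          · rw [pvGetD_set_ne _ _ _ _ _ (fun hh => hjej hh.symm), ih3 jn hjn]
            split
            · next h1 => rw [if_pos (by rw [hcast] at *; omega)]
            · next h1 => rw [if_neg (by rw [hcast] at *; omega)]
        · intro jn hjn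
          simp only [hsetu]
          by_cases hjej : jn = jn0
          · subst hjej
            rw [pvGetD_set_self _ _ _ _ (by rw [ih2]; exact hj0N),
                if_pos (by rw [hcast]; omega), hmin]
            push_cast; ring
          · rw [pvGetD_set_ne _ _ _ _ _ (fun hh => hjej hh.symm), ih4 jn hjn]
            split
            · next h1 => rw [if_pos (by rw [hcast] at *; omega)]
            · next h1 => rw [if_neg (by rw [hcast] at *; omega)]
        · simp only []
          rw [ih5, hsz, List.range_succ, List.countP_append]
          have : (List.countP (fun jn => pvReach f vn a jn && !f jn) [(v + (t : Int)).toNat]) = 1 := by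
            simp [List.countP_cons, ← hjn0def, hreach, hfj']
          rw [this]
          push_cast; ring
      · -- unreachable still
        have hft : f (vn + t) = false := by rw [← hj0vt]; exact hfj'
        have hreach : pvReach f vn a jn0 = false := by
          rw [hj0vt]
          cases h : pvReach f vn a (vn + t)
          · rfl
          · exact absurd ((pvReach_succ f vn a t hv' hft).mp h) hgo
        have hcond : ¬ (¬ (PySem.List.pyGetD r.1 (v + (t : Int)) false = true)
            ∧ (PySem.List.pyGetD r.1 (v + (t : Int) - v) false = true)
            ∧ (PySem.List.pyGetD r.2.1 (v + (t : Int) - v) 0 < a)) := by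
          rw [e1, e2, e3, hfj']
          rintro ⟨-, hb, hc⟩
          exact hgo ⟨hb, hc⟩
        rw [pvBodyA, if_neg hcond]
        refine ⟨ih1, ih2, ?_, ?_, ?_⟩
        · intro jn hjn
          rw [ih3 jn hjn]
          by_cases hjej : jn = jn0
          · subst hjej
            rw [if_neg (by omega), if_pos (by rw [hcast]; omega), hreach]
            exact hfj'
          · split
            · next h1 => rw [if_pos (by rw [hcast] at *; omega)]
            · next h1 => rw [if_neg (by rw [hcast] at *; omega)]
        · intro jn hjn
          rw [ih4 jn hjn]
          by_cases hjej : jn = jn0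
          · subst hjej
            rw [if_neg (by omega), if_pos (by rw [hcast]; omega)]
            unfold pvMin
            rw [dif_neg (by rw [hreach]; simp)]
            rfl
          · split
            · next h1 => rw [if_pos (by rw [hcast] at *; omega)]
            · next h1 => rw [if_neg (by rw [hcast] at *; omega)]
        · rw [ih5, hsz, List.range_succ, List.countP_append]
          have : (List.countP (fun jn => pvReach f vn a jn && !f jn) [(v + (t : Int)).toNat]) = 0 := by
            simp [List.countP_cons, ← hjn0def, hreach]
          rw [this, Nat.add_zero]

-- the full item step of A equals pvStep, and the counter advances by the number of new cells
lemma pvItemACore_spec (n v a : Int) (hn : 0 ≤ n) (hv : 0 ≤ v)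
    (dp0 : List Bool) (c : Int) (hdl : dp0.length = (n + 1).toNat) :
    ((pvItemACore n (dp0, c) v a).1.length = (n + 1).toNat) ∧
    (∀ jn < (n + 1).toNat,
      (pvItemACore n (dp0, c) v a).1.getD jn false = pvStep v a (fun i => dp0.getD i false) jn) ∧
    ((pvItemACore n (dp0, c) v a).2 =
      c + (((List.range (n + 1).toNat).countP (pvStep v a (fun i => dp0.getD i false)) : Int) -
           ((List.range (n + 1).toNat).countP (fun i => dp0.getD i false) : Int))) := by
  simp only [pvItemACore]
  by_cases hskip : v ≤ 0 ∨ a ≤ 0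
  · have hfix : (PySem.List.pyRange v (n + 1) 1).foldl (pvBodyA v a)
        (dp0, (PySem.List.pyRange 0 (n + 1) 1).map (fun _ => (0 : Int)), c) =
        (dp0, (PySem.List.pyRange 0 (n + 1) 1).map (fun _ => (0 : Int)), c) := by
      apply pvFoldl_fixed
      intro j hj
      rw [pvBodyA, if_neg]
      rintro ⟨h1, h2, h3⟩
      rcases hskip with hv0 | ha0
      · have hveq : v = 0 := le_antisymm hv0 hv
        subst hveq
        rw [sub_zero] at h2
        exact h1 h2
      · rw [pvGetD_const0] at h3
        omega
    rw [hfix]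
    have hstep : pvStep v a (fun i => dp0.getD i false) = fun i => dp0.getD i false := by
      funext i; simp [pvStep, hskip]
    refine ⟨hdl, ?_, ?_⟩
    · intro jn hjn; rw [hstep]
    · rw [hstep]; ring
  · push_neg at hskip
    obtain ⟨hv1, ha1⟩ := hskip
    have hv0 : 0 < v := by omega
    have ha0 : 0 < a := by omega
    have hstep : pvStep v a (fun i => dp0.getD i false) =
        fun i => pvReach (fun i => dp0.getD i false) v.toNat a i := by
      funext i; simp [pvStep]; omega
    have hmono : ∀ x ∈ List.range (n + 1).toNat,
        (fun i => dp0.getD i false) x = true →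
        pvReach (fun i => dp0.getD i false) v.toNat a x = true := by
      intro x _ hx
      exact pvReach_of_f _ _ _ _ ha0 hx
    by_cases hle : v ≤ n + 1
    · have ht : v + (((n + 1 - v).toNat : Nat) : Int) ≤ n + 1 := by omega
      obtain ⟨a1, a2, a3, a4, a5⟩ := pvInnerA_aux n v a hn hv0 ha0 dp0 c hdl (n + 1 - v).toNat ht
      have hvt : v + (((n + 1 - v).toNat : Nat) : Int) = n + 1 := by omega
      rw [hvt] at a1 a2 a3 a4 a5
      refine ⟨a1, ?_, ?_⟩
      · intro jn hjn
        rw [a3 jn hjn, if_pos (by omega), hstep]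
      · rw [a5, hstep]
        have hs := pvCountP_split (List.range (n + 1).toNat) (fun i => dp0.getD i false)
          (fun i => pvReach (fun i => dp0.getD i false) v.toNat a i) hmono
        beta_reduce at hs ⊢
        omega
    · have hnil : PySem.List.pyRange v (n + 1) 1 = [] :=
        PySem.List.pyRange_one_eq_nil (by omega)
      rw [hnil, List.foldl_nil]
      have hlow : ∀ jn < (n + 1).toNat,
          pvReach (fun i => dp0.getD i false) v.toNat a jn = dp0.getD jn false := by
        intro jn hjn
        exact pvReach_low _ _ _ _ (by omega) ha0 (by omega)
      refine ⟨hdl, ?_, ?_⟩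
      · intro jn hjn
        rw [hstep]
        exact (hlow jn hjn).symm
      · rw [hstep]
        have : (List.range (n + 1).toNat).countP
            (fun i => pvReach (fun i => dp0.getD i false) v.toNat a i) =
            (List.range (n + 1).toNat).countP (fun i => dp0.getD i false) := by
          apply List.countP_congr
          intro x hx
          rw [List.mem_range] at hx
          rw [hlow x hx]
        rw [this]; ring

-- outer index loop of A as a fold over the zipped pairs
lemma pvFoldl_zip_index {β : Type} (value amount : List Int) (h : value.length ≤ amount.length)
    (g : β → Int → Int → β) (init : β) :
    (PySem.List.pyRange 0 (value.length : Int) 1).foldl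
      (fun st i => g st (PySem.List.pyGetD value i 0) (PySem.List.pyGetD amount i 0)) init
    = (value.zip amount).foldl (fun st va => g st va.1 va.2) init := by
  rw [PySem.List.pyRange_zero_nat, List.foldl_map]
  induction value generalizing amount init with
  | nil => simp
  | cons x xs ihx =>
    cases amount with
    | nil => simp at h
    | cons y ys =>
      rw [List.zip_cons_cons, List.foldl_cons]
      have hrs : List.range (x :: xs).length = 0 :: (List.range xs.length).map (fun k => 1 + k) := by
        rw [List.length_cons, List.range_eq_range', List.range'_succ,
            List.range'_eq_map_range, List.range_eq_range']
      rw [hrs, List.foldl_cons, List.foldl_map]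
      have h0 : PySem.List.pyGetD (x :: xs) ((0 : Nat) : Int) 0 = x := by
        rw [PySem.List.pyGetD_natCast]; rfl
      have h0' : PySem.List.pyGetD (y :: ys) ((0 : Nat) : Int) 0 = y := by
        rw [PySem.List.pyGetD_natCast]; rfl
      rw [h0, h0']
      have ih := ihx ys (by simpa using h) (g init x y)
      rw [← ih]
      apply List.foldl_ext
      intro st k hk
      rw [show (1 + k) = k + 1 from Nat.add_comm 1 k,
          PySem.List.pyGetD_natCast, PySem.List.pyGetD_natCast,
          PySem.List.pyGetD_natCast, PySem.List.pyGetD_natCast,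
          List.getD_cons_succ, List.getD_cons_succ]

lemma pvStep_congr (v a : Int) (F G : Nat → Bool) (jn : Nat)
    (h : ∀ i ≤ jn, F i = G i) : pvStep v a F jn = pvStep v a G jn := by
  unfold pvStep
  split
  · exact h jn le_rfl
  · exact pvReach_congr F G v.toNat a jn h

lemma pvOuterA (n : Int) (hn : 0 ≤ n) (pairs : List (Int × Int)) :
    ∀ (F : Nat → Bool) (dp : List Bool) (c : Int),
      (∀ va ∈ pairs, 0 ≤ va.1) →
      dp.length = (n + 1).toNat →
      (∀ jn < (n + 1).toNat, dp.getD jn false = F jn) →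
      c = ((List.range (n + 1).toNat).countP F : Int) - 1 →
      ((pairs.foldl (fun st va => pvItemACore n st va.1 va.2) (dp, c)).1.length = (n + 1).toNat) ∧
      (∀ jn < (n + 1).toNat,
        (pairs.foldl (fun st va => pvItemACore n st va.1 va.2) (dp, c)).1.getD jn false =
        (pairs.foldl (fun f va => pvStep va.1 va.2 f) F) jn) ∧
      ((pairs.foldl (fun st va => pvItemACore n st va.1 va.2) (dp, c)).2 =
        ((List.range (n + 1).toNat).countP (pairs.foldl (fun f va => pvStep va.1 va.2 f) F) : Int) - 1) := by
  induction pairs with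
  | nil =>
    intro F dp c _ h1 h2 h3
    exact ⟨h1, h2, h3⟩
  | cons va rest ih =>
    intro F dp c hp h1 h2 h3
    rw [List.foldl_cons, List.foldl_cons]
    obtain ⟨s1, s2, s3⟩ := pvItemACore_spec n va.1 va.2 hn (hp va (by simp)) dp c h1
    have hcong : ∀ jn < (n + 1).toNat,
        (pvItemACore n (dp, c) va.1 va.2).1.getD jn false = pvStep va.1 va.2 F jn := by
      intro jn hjn
      rw [s2 jn hjn]
      exact pvStep_congr va.1 va.2 _ F jn (fun i hi => h2 i (by omega))
    have hcnt1 : (List.range (n + 1).toNat).countP (fun i => dp.getD i false) =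
        (List.range (n + 1).toNat).countP F := by
      apply List.countP_congr
      intro x hx
      rw [List.mem_range] at hx
      rw [h2 x hx]
    have hcnt2 : (List.range (n + 1).toNat).countP (pvStep va.1 va.2 (fun i => dp.getD i false)) =
        (List.range (n + 1).toNat).countP (pvStep va.1 va.2 F) := by
      apply List.countP_congr
      intro x hx
      rw [List.mem_range] at hx
      rw [pvStep_congr va.1 va.2 _ F x (fun i hi => h2 i (by omega))]
    have hc' : (pvItemACore n (dp, c) va.1 va.2).2 =
        ((List.range (n + 1).toNat).countP (pvStep va.1 va.2 F) : Int) - 1 := by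
      rw [s3, h3, hcnt1, hcnt2]; ring
    exact ih (pvStep va.1 va.2 F) (pvItemACore n (dp, c) va.1 va.2).1
      (pvItemACore n (dp, c) va.1 va.2).2
      (fun x hx => hp x (by simp [hx])) s1 hcong hc'

lemma pvStepB_spec (n : Int) (hn : 0 ≤ n) (va : Int × Int) (dp : List Bool) (F : Nat → Bool)
    (hdl : dp.length = (n + 1).toNat)
    (hRep : ∀ jn < (n + 1).toNat, dp.getD jn false = F jn) :
    ((pvStepB n dp va).length = (n + 1).toNat) ∧
    (∀ jn < (n + 1).toNat, (pvStepB n dp va).getD jn false = pvStep va.1 va.2 F jn) := by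
  unfold pvStepB
  by_cases hskip : va.1 ≤ 0 ∨ va.2 ≤ 0
  · rw [if_pos hskip]
    refine ⟨hdl, ?_⟩
    intro jn hjn
    rw [hRep jn hjn]
    simp [pvStep, hskip]
  · rw [if_neg hskip]
    push_neg at hskip
    obtain ⟨hv0, ha0⟩ := hskip
    have hvv : ((va.1.toNat : Nat) : Int) = va.1 := Int.toNat_of_nonneg (by omega)
    have hNc : (n + 1 : Int) = (((n + 1).toNat : Nat) : Int) := by omega
    have hvn1 : 0 < va.1.toNat := by omega
    constructor
    · rw [List.length_map, hNc, PySem.List.pyRange_zero_nat, List.length_map,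
          List.length_range]
      omega
    · intro jn hjn
      rw [List.getD_eq_getElem?_getD, hNc,
          PySem.List.getElem?_map_pyRange_zero _ _ _ hjn]
      simp only [Option.getD_some]
      rw [pvStep, if_neg (by omega)]
      rw [Bool.eq_iff_iff, List.any_eq_true, pvReach_iff]
      constructor
      · rintro ⟨x, hxmem, hpred⟩
        rw [PySem.List.mem_pyRange_one] at hxmem
        obtain ⟨hx0, hxlt⟩ := hxmem
        have hxmin : x ≤ min va.2 (PySem.Int.floordiv (jn : Int) va.1) := by omega
        rw [le_min_iff] at hxmin
        have hxmul : x * va.1 ≤ (jn : Int) :=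
          (PySem.Int.le_floordiv_iff_mul_le hv0).mp hxmin.2
        set k := x.toNat with hkdef
        have hxk : x = (k : Int) := by omega
        have hprod : x * va.1 = ((k * va.1.toNat : Nat) : Int) := by
          rw [hxk]; push_cast; rw [hvv]
        have hkmul : k * va.1.toNat ≤ jn := by omega
        have hidx : ((jn : Int) - x * va.1).toNat = jn - k * va.1.toNat := by omega
        refine ⟨k, le_trans (Nat.le_mul_of_pos_right k hvn1) hkmul, by omega, hkmul, ?_⟩
        rw [pvGetD_int _ _ _ (by omega), hidx] at hpred
        rw [← hRep _ (by omega)]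
        exact hpred
      · rintro ⟨k, hk1, hk2, hk3, hk4⟩
        have hprod : (k : Int) * va.1 = ((k * va.1.toNat : Nat) : Int) := by
          push_cast; rw [hvv]
        have hkfd : (k : Int) ≤ PySem.Int.floordiv (jn : Int) va.1 := by
          rw [PySem.Int.le_floordiv_iff_mul_le hv0]; omega
        refine ⟨(k : Int), ?_, ?_⟩
        · rw [PySem.List.mem_pyRange_one]
          refine ⟨by omega, ?_⟩
          have : (k : Int) ≤ min va.2 (PySem.Int.floordiv (jn : Int) va.1) :=
            le_min_iff.mpr ⟨hk2, hkfd⟩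
          omega
        · have hidx : ((jn : Int) - (k : Int) * va.1).toNat = jn - k * va.1.toNat := by omega
          rw [pvGetD_int _ _ _ (by omega), hidx, hRep _ (by omega)]
          exact hk4

lemma pvOuterB (n : Int) (hn : 0 ≤ n) (pairs : List (Int × Int)) :
    ∀ (F : Nat → Bool) (dp : List Bool),
      dp.length = (n + 1).toNat →
      (∀ jn < (n + 1).toNat, dp.getD jn false = F jn) →
      ((pairs.foldl (pvStepB n) dp).length = (n + 1).toNat) ∧
      (∀ jn < (n + 1).toNat,
        (pairs.foldl (pvStepB n) dp).getD jn false =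
        (pairs.foldl (fun f va => pvStep va.1 va.2 f) F) jn) := by
  induction pairs with
  | nil =>
    intro F dp h1 h2
    exact ⟨h1, h2⟩
  | cons va rest ih =>
    intro F dp h1 h2
    rw [List.foldl_cons, List.foldl_cons]
    obtain ⟨s1, s2⟩ := pvStepB_spec n hn va dp F h1 h2
    have hcong : ∀ jn < (n + 1).toNat,
        (pvStepB n dp va).getD jn false = pvStep va.1 va.2 F jn := by
      intro jn hjn
      rw [s2 jn hjn]
    exact ih (pvStep va.1 va.2 F) (pvStepB n dp va) s1 hcong

lemma pvDP_zero (pairs : List (Int × Int)) : pvDP pairs 0 = true := by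
  unfold pvDP
  have : ∀ (F : Nat → Bool), F 0 = true →
      (pairs.foldl (fun f va => pvStep va.1 va.2 f) F) 0 = true := by
    induction pairs with
    | nil => intro F hF; exact hF
    | cons va rest ih =>
      intro F hF
      rw [List.foldl_cons]
      apply ih
      unfold pvStep
      split
      · exact hF
      · next hs =>
        rw [pvReach_iff]
        exact ⟨0, le_refl 0, by push_neg at hs; omega, by simp, by simpa using hF⟩
  exact this _ (by simp)

lemma pvFalse0_getD (m : Int) (jn : Nat) :
    ((PySem.List.pyRange 0 m 1).map (fun _ => false)).getD jn false = false := by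
  rw [List.getD_eq_getElem?_getD, List.getElem?_map]
  cases (PySem.List.pyRange 0 m 1)[jn]? <;> rfl

lemma pvCount_init (N : Nat) (hN : 0 < N) :
    (List.range N).countP (fun j => decide (j = 0)) = 1 := by
  obtain ⟨m, rfl⟩ : ∃ m, N = m + 1 := ⟨N - 1, by omega⟩
  rw [List.range_eq_range', List.range'_succ, List.countP_cons]
  simp only [decide_eq_true_eq]
  rw [List.range'_eq_map_range, List.countP_map]
  have : (List.range m).countP ((fun j => decide (j = 0)) ∘ fun x => 1 + x) = 0 := by
    rw [List.countP_eq_zero]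
    intro x _
    simp [Function.comp]
  rw [this]
  simp

lemma pvLA (n : Int) (value amount : List Int)
    (hn : 0 ≤ n) (hlen : value.length ≤ amount.length) (hv : ∀ v ∈ value, 0 ≤ v) :
    backPackVIII n value amount =
      ((List.range (n + 1).toNat).countP (pvDP (value.zip amount)) : Int) - 1 := by
  unfold backPackVIII
  have hzip := pvFoldl_zip_index (β := List Bool × Int) value amount hlen
    (fun st v a => pvItemACore n st v a)
    (PySem.List.pySetD ((PySem.List.pyRange 0 (n + 1) 1).map (fun _ => false)) 0 true, 0)
  have hfold : (PySem.List.pyRange 0 (value.length : Int) 1).foldl (pvItemA n value amount)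
      (PySem.List.pySetD ((PySem.List.pyRange 0 (n + 1) 1).map (fun _ => false)) 0 true, 0) =
      (PySem.List.pyRange 0 (value.length : Int) 1).foldl
        (fun st i => pvItemACore n st (PySem.List.pyGetD value i 0) (PySem.List.pyGetD amount i 0))
        (PySem.List.pySetD ((PySem.List.pyRange 0 (n + 1) 1).map (fun _ => false)) 0 true, 0) := by
    apply List.foldl_ext
    intro st i _
    rfl
  rw [hfold, hzip]
  -- properties of the initial dp
  set dp1 := PySem.List.pySetD ((PySem.List.pyRange 0 (n + 1) 1).map (fun _ => false)) 0 true with hdp1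
  have hN0 : 0 < (n + 1).toNat := by omega
  have hlen0 : ((PySem.List.pyRange 0 (n + 1) 1).map (fun _ => false)).length = (n + 1).toNat := by
    simp [PySem.List.length_pyRange_one]
  have hdp1eq : dp1 = ((PySem.List.pyRange 0 (n + 1) 1).map (fun _ => false)).set 0 true := by
    rw [hdp1, pvSetD_int _ _ _ (le_refl 0)]
    rfl
  have hlen1 : dp1.length = (n + 1).toNat := by
    rw [hdp1eq, List.length_set, hlen0]
  have hget1 : ∀ jn < (n + 1).toNat, dp1.getD jn false = decide (jn = 0) := by
    intro jn hjn
    rw [hdp1eq]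
    by_cases hj : jn = 0
    · subst hj
      rw [pvGetD_set_self _ _ _ _ (by rw [hlen0]; exact hN0)]
      simp
    · rw [pvGetD_set_ne _ _ _ _ _ (fun hh => hj hh.symm), pvFalse0_getD]
      simp [hj]
  have hc0 : (0 : Int) = ((List.range (n + 1).toNat).countP (fun j => decide (j = 0)) : Int) - 1 := by
    rw [pvCount_init _ hN0]
    ring
  have hp : ∀ va ∈ value.zip amount, 0 ≤ va.1 := by
    intro va hva
    exact hv va.1 (List.of_mem_zip hva).1
  obtain ⟨o1, o2, o3⟩ := pvOuterA n hn (value.zip amount) (fun j => decide (j = 0)) dp1 0 hp hlen1 hget1 hc0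
  rw [o3]
  rfl

lemma pvLB (n : Int) (value amount : List Int) (hn : 0 ≤ n) :
    backPackVIII_alt n value amount =
      ((List.range (n + 1).toNat).countP (pvDP (value.zip amount)) : Int) - 1 := by
  unfold backPackVIII_alt
  have hN0 : 0 < (n + 1).toNat := by omega
  have hNc : (n + 1 : Int) = (((n + 1).toNat : Nat) : Int) := by omega
  set dp0 := (PySem.List.pyRange 0 (n + 1) 1).map (fun j => j == 0) with hdp0
  have hlen0 : dp0.length = (n + 1).toNat := by
    rw [hdp0, List.length_map, hNc, PySem.List.pyRange_zero_nat, List.length_map,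
        List.length_range]
    omega
  have hget0 : ∀ jn < (n + 1).toNat, dp0.getD jn false = decide (jn = 0) := by
    intro jn hjn
    rw [hdp0, List.getD_eq_getElem?_getD, hNc,
        PySem.List.getElem?_map_pyRange_zero _ _ _ hjn]
    simp only [Option.getD_some]
    rw [Bool.eq_iff_iff, beq_iff_eq, decide_eq_true_eq]
    omega
  obtain ⟨b1, b2⟩ := pvOuterB n hn (value.zip amount) (fun j => decide (j = 0)) dp0 hlen0 hget0
  set dpF := (value.zip amount).foldl (pvStepB n) dp0 with hdpF
  have hdpeq : dpF = (List.range (n + 1).toNat).map (pvDP (value.zip amount)) := by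
    apply List.ext_getElem
    · rw [b1, List.length_map, List.length_range]
    · intro i h1 h2
      rw [List.length_map, List.length_range] at h2
      rw [← List.getD_eq_getElem dpF false (by omega), b2 i (by rwa [b1] at h1)]
      rw [List.getElem_map, List.getElem_range]
      rfl
  rw [PySem.List.slice_from_one, hdpeq]
  obtain ⟨m, hm⟩ : ∃ m, (n + 1).toNat = m + 1 := ⟨(n + 1).toNat - 1, by omega⟩
  rw [hm, List.range_eq_range', List.range'_succ, List.map_cons, List.tail_cons,
      PySem.List.sum_map_ite_one_zero (fun b => b), List.countP_map, List.countP_cons]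
  have h0 : pvDP (value.zip amount) 0 = true := pvDP_zero _
  have hcc : (List.range' (0 + 1) m).countP ((fun b => b) ∘ pvDP (value.zip amount)) =
      (List.range' (0 + 1) m).countP (pvDP (value.zip amount)) := by
    apply List.countP_congr
    intro x _
    simp [Function.comp]
  rw [hcc]
  simp only [h0, if_true]
  push_cast
  omega

-- ===== VERDICT (by name: the statement is the Claim_ definition above) =====
theorem backPackVIII_spec : Claim_equal_backPackVIII := by
  intro n value amount _ hpre
  obtain ⟨hn, hlen, hv⟩ := hpre
  unfold Spec_backPackVIII
  rw [pvLA n value amount hn hlen hv, pvLB n value amount hn]
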